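-- pv_equiv track=rewrite | github.com/dangduongminhnhat/ctf_challenge | osu!gaming CTF 2024/base727/727.py | encode_base_727
-- ===== SOURCE A (Python) =====
-- def encode_base_727(string):
--     base = 727
--     encoded_value = 0
--
--     for char in string:
--         encoded_value = encoded_value * 256 + ord(char)
--
--     encoded_string = ""
--     while encoded_value > 0:
--         encoded_string = chr(encoded_value % base) + encoded_string
--         encoded_value //= base
--
--     return encoded_string
-- ===== SOURCE B (Python) =====
-- def encode_base_727(string):
--     # Digit-array arithmetic: keep the base-727 digits (least significant first)
--     # and fold each character in as digits = digits*256 + ord(char), digit by digit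
--     # with a carry; no big integer is ever built or divided.
--     digits = []
--     for char in string:
--         carry = ord(char)
--         for i in range(len(digits)):
--             carry += digits[i] * 256
--             digits[i] = carry % 727
--             carry //= 727
--         while carry:
--             digits.append(carry % 727)
--             carry //= 727
--     return ''.join(chr(d) for d in reversed(digits))
-- ===== Notes on version B (the rewrite author's own statement) =====
-- stated objective: alternative
-- what changed: B never builds the big base-256 integer and never divmods it: it maintains the base-727 digit array directly, folding each character in by a multiply-by-256-with-carry pass over the digits, then emits the reversed digit list once.
import Mathlib
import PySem

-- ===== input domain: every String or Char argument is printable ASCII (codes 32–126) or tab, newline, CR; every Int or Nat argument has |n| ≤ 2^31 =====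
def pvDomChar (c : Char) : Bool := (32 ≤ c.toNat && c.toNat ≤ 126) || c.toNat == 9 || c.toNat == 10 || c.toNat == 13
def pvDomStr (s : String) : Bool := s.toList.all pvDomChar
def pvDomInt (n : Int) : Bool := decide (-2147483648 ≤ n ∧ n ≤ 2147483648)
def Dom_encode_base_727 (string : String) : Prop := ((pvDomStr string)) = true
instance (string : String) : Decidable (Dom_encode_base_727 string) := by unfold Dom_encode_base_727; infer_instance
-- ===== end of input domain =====

-- B replaces A's big-integer build-then-divmod with direct base-727 digit-array arithmetic
-- (fold each character in with a multiply-by-256-and-carry pass); same return value.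

-- termination measure lemma used by A's while-loop port
theorem pvDiv727_lt (v : Int) (h : 0 < v) :
    (PySem.Int.floordiv v 727).toNat < v.toNat := by
  rw [PySem.Int.floordiv_eq_ediv_of_pos (by norm_num)]
  have h1 : 727 * (v / 727) + v % 727 = v := Int.mul_ediv_add_emod v 727
  have h2 : 0 ≤ v % 727 := Int.emod_nonneg v (by norm_num)
  have h3 : v % 727 < 727 := Int.emod_lt_of_pos v (by norm_num)
  omega

-- ===== PORT A =====
-- A's while loop: prepend chr(v % 727) to the accumulated string, v //= 727
def pvLoopA (v : Int) (s : List Char) : List Char :=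
  if h : 0 < v then
    pvLoopA (PySem.Int.floordiv v 727) (Char.ofNat (PySem.Int.mod v 727).toNat :: s)
  else s
termination_by v.toNat
decreasing_by exact pvDiv727_lt v h

def encode_base_727 (string : String) : String :=
  let encoded_value : Int :=
    string.toList.foldl (fun acc c => acc * 256 + (c.toNat : Int)) 0
  String.mk (pvLoopA encoded_value [])

-- ===== PORT B =====
-- B's 'while carry:' tail loop: append carry % 727, carry //= 727
def pvCarry (c : Nat) : List Nat :=
  if 0 < c then (c % 727) :: pvCarry (c / 727) else []
termination_by c
decreasing_by exact Nat.div_lt_self (by omega) (by norm_num)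

-- B's inner 'for i in range(len(digits))' pass: update each digit in place threading the
-- carry, then the 'while carry:' tail (pvCarry); structural recursion over the same
-- LSB-first digit list B mutates
def pvMulAdd : List Nat → Nat → List Nat
  | [], carry => pvCarry carry
  | d :: ds, carry => ((d * 256 + carry) % 727) :: pvMulAdd ds ((d * 256 + carry) / 727)

def encode_base_727_alt (string : String) : String :=
  let digits := string.toList.foldl (fun D ch => pvMulAdd D ch.toNat) []
  String.mk (digits.reverse.map Char.ofNat)

-- ===== PRECONDITION & SPEC =====
def Spec_encode_base_727 (string : String) (out : String) : Prop := out = encode_base_727_alt string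
instance (string : String) (out : String) : Decidable (Spec_encode_base_727 string out) := by unfold Spec_encode_base_727; infer_instance

-- ===== CLAIM =====
def Claim_equal_encode_base_727 : Prop := ∀ (string : String), Dom_encode_base_727 string → Spec_encode_base_727 string (encode_base_727 string)

-- ===== LEMMAS AND PROOFS =====

-- folding one character into a canonical digit list is multiply-by-256-and-add
theorem pvMulAdd_carry (m : Nat) : ∀ c, pvMulAdd (pvCarry m) c = pvCarry (256 * m + c) := by
  induction m using Nat.strong_induction_on with
  | _ m ih =>
    intro c
    by_cases h : 0 < m
    · rw [pvCarry, if_pos h]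
      simp only [pvMulAdd]
      rw [ih (m / 727) (Nat.div_lt_self h (by norm_num)) ((m % 727 * 256 + c) / 727)]
      have key1 : (m % 727 * 256 + c) % 727 = (256 * m + c) % 727 := by omega
      have key2 : 256 * (m / 727) + (m % 727 * 256 + c) / 727 = (256 * m + c) / 727 := by omega
      rw [show pvCarry (256 * m + c) = ((256 * m + c) % 727) :: pvCarry ((256 * m + c) / 727) by
            rw [pvCarry, if_pos (by omega)], key1, key2]
    · have hm : m = 0 := by omega
      subst hm
      rw [pvCarry, if_neg h]
      show pvMulAdd [] c = pvCarry (256 * 0 + c)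
      rw [Nat.mul_zero, Nat.zero_add]
      rfl

-- B's fold over the characters produces the canonical base-727 digits of A's base-256 value
theorem pvFold_eq (l : List Char) : ∀ m : Nat,
    l.foldl (fun D ch => pvMulAdd D ch.toNat) (pvCarry m)
      = pvCarry (l.foldl (fun a ch => a * 256 + ch.toNat) m) := by
  induction l with
  | nil => intro m; rfl
  | cons ch l ih =>
    intro m
    simp only [List.foldl_cons]
    rw [pvMulAdd_carry, ih]
    ring_nf

-- A's Int fold is the cast of the Nat fold
theorem pvVal_cast (l : List Char) : ∀ m : Nat,
    l.foldl (fun acc c => acc * 256 + (c.toNat : Int)) (m : Int)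
      = ((l.foldl (fun a ch => a * 256 + ch.toNat) m : Nat) : Int) := by
  induction l with
  | nil => intro m; rfl
  | cons c l ih =>
    intro m
    simp only [List.foldl_cons]
    rw [show (m : Int) * 256 + (c.toNat : Int) = ((m * 256 + c.toNat : Nat) : Int) by push_cast; ring,
        ih]

-- A's divmod loop prints the canonical digits most-significant first
theorem pvLoopA_carry (n : Nat) : ∀ s, pvLoopA (n : Int) s = ((pvCarry n).map Char.ofNat).reverse ++ s := by
  induction n using Nat.strong_induction_on with
  | _ n ih =>
    intro s
    by_cases h : 0 < n
    · have hpos : (0 : Int) < (n : Int) := by exact_mod_cast h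
      rw [pvLoopA, dif_pos hpos, pvCarry, if_pos h,
          show PySem.Int.floordiv (n : Int) 727 = ((n / 727 : Nat) : Int) from
            PySem.Int.floordiv_natCast n 727,
          show PySem.Int.mod (n : Int) 727 = ((n % 727 : Nat) : Int) from
            PySem.Int.mod_natCast n 727,
          ih (n / 727) (Nat.div_lt_self h (by norm_num))]
      simp
      congr 1
    · have hn : n = 0 := by omega
      subst hn
      rw [pvLoopA, dif_neg (by norm_num), pvCarry, if_neg (by norm_num)]
      rfl

-- ===== VERDICT =====
theorem encode_base_727_spec : Claim_equal_encode_base_727 := by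
  intro string _
  unfold Spec_encode_base_727 encode_base_727 encode_base_727_alt
  show String.mk (pvLoopA (string.toList.foldl (fun acc c => acc * 256 + (c.toNat : Int)) 0) [])
      = String.mk ((string.toList.foldl (fun D ch => pvMulAdd D ch.toNat) []).reverse.map Char.ofNat)
  rw [show ((0 : Int)) = ((0 : Nat) : Int) from rfl, pvVal_cast,
      show ([] : List Nat) = pvCarry 0 by rw [pvCarry]; simp, pvFold_eq,
      pvLoopA_carry]
  simp
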